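-- pv_equiv track=rewrite | github.com/ArminKuburas/python_google_foobar | Half_a_triangle.py | solution
-- ===== SOURCE A (Python) =====
-- def solution(x, y):
-- 	worker_id = 1
-- 	num = 1
--
-- 	while x > 1:
-- 		num += 1
-- 		worker_id += num
-- 		x -= 1
-- 	while y > 1:
-- 		worker_id += num
-- 		num += 1
-- 		y -= 1
-- 	return str(worker_id)
-- ===== SOURCE B (Python) =====
-- def solution(x, y):
--     X = x if x > 1 else 1
--     Y = y if y > 1 else 1
--     return str(X * (X + 1) // 2 + (Y - 1) * X + (Y - 1) * (Y - 2) // 2)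
-- ===== Notes on version B (the rewrite author's own statement) =====
-- stated objective: faster
-- what changed: Replaced the two decrementing while-loops with a closed-form arithmetic expression (triangular number plus arithmetic series).
import Mathlib
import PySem

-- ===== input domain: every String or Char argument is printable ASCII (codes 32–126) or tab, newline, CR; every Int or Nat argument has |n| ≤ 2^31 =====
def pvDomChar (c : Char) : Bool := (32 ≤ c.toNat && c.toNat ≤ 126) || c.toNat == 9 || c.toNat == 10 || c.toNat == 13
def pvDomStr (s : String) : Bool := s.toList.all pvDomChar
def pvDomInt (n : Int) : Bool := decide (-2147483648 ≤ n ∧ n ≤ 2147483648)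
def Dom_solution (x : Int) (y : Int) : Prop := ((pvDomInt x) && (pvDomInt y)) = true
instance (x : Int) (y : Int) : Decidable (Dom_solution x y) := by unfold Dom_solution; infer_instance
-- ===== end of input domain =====

-- B replaces A's two O(x+y) while-loops by a closed-form O(1) arithmetic expression.

-- ===== PORT A =====
-- first while loop: `while x > 1: num += 1; worker_id += num; x -= 1`; returns (num, worker_id)
def solLoopX (x num wid : Int) : Int × Int :=
  if x > 1 then solLoopX (x - 1) (num + 1) (wid + (num + 1)) else (num, wid)
termination_by x.toNat
decreasing_by omega

-- second while loop: `while y > 1: worker_id += num; num += 1; y -= 1`; returns worker_id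
def solLoopY (y num wid : Int) : Int :=
  if y > 1 then solLoopY (y - 1) (num + 1) (wid + num) else wid
termination_by y.toNat
decreasing_by omega

def solution (x : Int) (y : Int) : String :=
  let p := solLoopX x 1 1
  PySem.Int.toStr (solLoopY y p.1 p.2)

-- ===== PORT B =====
def solution_alt (x : Int) (y : Int) : String :=
  let X := if x > 1 then x else 1
  let Y := if y > 1 then y else 1
  PySem.Int.toStr (PySem.Int.floordiv (X * (X + 1)) 2 + (Y - 1) * X
    + PySem.Int.floordiv ((Y - 1) * (Y - 2)) 2)

-- ===== PRECONDITION & SPEC =====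
def Spec_solution (x : Int) (y : Int) (out : String) : Prop := out = solution_alt x y
instance (x : Int) (y : Int) (out : String) : Decidable (Spec_solution x y out) := by unfold Spec_solution; infer_instance

-- ===== CLAIM (what is proved, stated in full; the proofs are below) =====
def Claim_equal_solution : Prop := ∀ (x : Int) (y : Int), Dom_solution x y → Spec_solution x y (solution x y)

-- ===== LEMMAS AND PROOFS =====

-- floordiv ((k+1)*k) 2 = floordiv (k*(k-1)) 2 + k
theorem tri_step (k : Int) :
    PySem.Int.floordiv ((k + 1) * k) 2 = PySem.Int.floordiv (k * (k - 1)) 2 + k := by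
  rw [PySem.Int.floordiv_eq_ediv_of_pos (by omega : (0:Int) < 2),
      PySem.Int.floordiv_eq_ediv_of_pos (by omega : (0:Int) < 2)]
  have h : (k + 1) * k = k * (k - 1) + k * 2 := by ring
  rw [h, Int.add_mul_ediv_right _ _ (by omega)]

theorem solLoopX_closed : ∀ (n : Nat) (num wid : Int),
    solLoopX ((n : Int) + 1) num wid
      = (num + (n : Int), wid + (n : Int) * num + PySem.Int.floordiv (((n : Int) + 1) * (n : Int)) 2) := by
  intro n
  induction n with
  | zero => intro num wid; rw [solLoopX]; norm_num
  | succ m ih =>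
      intro num wid
      rw [solLoopX, if_pos (by push_cast; omega : ((m + 1 : Nat) : Int) + 1 > 1),
          show ((m + 1 : Nat) : Int) + 1 - 1 = (m : Int) + 1 by push_cast; ring, ih]
      have h3 := tri_step ((m : Int) + 1)
      simp only [Prod.mk.injEq]
      constructor
      · push_cast; ring
      · push_cast
        rw [show (m:Int) + 1 + 1 = ((m:Int)+1) + 1 by ring] at h3 ⊢
        rw [h3]; ring

theorem solLoopY_closed : ∀ (n : Nat) (num wid : Int),
    solLoopY ((n : Int) + 1) num wid
      = wid + (n : Int) * num + PySem.Int.floordiv ((n : Int) * ((n : Int) - 1)) 2 := by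
  intro n
  induction n with
  | zero => intro num wid; rw [solLoopY]; norm_num
  | succ m ih =>
      intro num wid
      rw [solLoopY, if_pos (by push_cast; omega : ((m + 1 : Nat) : Int) + 1 > 1),
          show ((m + 1 : Nat) : Int) + 1 - 1 = (m : Int) + 1 by push_cast; ring, ih,
          show ((m + 1 : Nat) : Int) * (((m + 1 : Nat) : Int) - 1) = ((m:Int) + 1) * (m:Int) by push_cast; ring,
          tri_step (m : Int)]
      push_cast; ring

-- ===== VERDICT (by name: the statement is the Claim_ definition above) =====
theorem solution_spec : Claim_equal_solution := by
  intro x y _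
  unfold Spec_solution solution solution_alt
  set X : Int := if x > 1 then x else 1 with hX
  set Y : Int := if y > 1 then y else 1 with hY
  have hX1 : 1 ≤ X := by rw [hX]; split <;> omega
  have hY1 : 1 ≤ Y := by rw [hY]; split <;> omega
  -- loop X result
  have hx : solLoopX x 1 1 = (X, X + PySem.Int.floordiv (X * (X - 1)) 2) := by
    by_cases h : x > 1
    · have hXx : X = x := by rw [hX]; simp [h]
      obtain ⟨n, hn⟩ : ∃ n : Nat, x = (n : Int) + 1 := ⟨(x - 1).toNat, by omega⟩
      rw [hn, solLoopX_closed, tri_step (n : Int)]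
      simp only [Prod.mk.injEq]
      constructor
      · rw [hXx, hn]; ring
      · rw [hXx, hn]
        rw [show ((n:Int) + 1) * ((n:Int) + 1 - 1) = ((n:Int)+1) * (n:Int) by ring, tri_step (n:Int)]
        ring
    · have hXx : X = 1 := by rw [hX]; simp [h]
      rw [solLoopX, if_neg h, hXx]
      norm_num
  have hy : solLoopY y X (X + PySem.Int.floordiv (X * (X - 1)) 2)
      = X + PySem.Int.floordiv (X * (X - 1)) 2 + (Y - 1) * X
        + PySem.Int.floordiv ((Y - 1) * (Y - 2)) 2 := by
    by_cases h : y > 1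
    · have hYy : Y = y := by rw [hY]; simp [h]
      obtain ⟨n, hn⟩ : ∃ n : Nat, y = (n : Int) + 1 := ⟨(y - 1).toNat, by omega⟩
      rw [hn, solLoopY_closed, hYy, hn]
      ring_nf
    · have hYy : Y = 1 := by rw [hY]; simp [h]
      rw [solLoopY, if_neg h, hYy]
      norm_num
  rw [hx]
  simp only []
  rw [hy]
  have htri : PySem.Int.floordiv (X * (X + 1)) 2
      = PySem.Int.floordiv (X * (X - 1)) 2 + X := by
    have := tri_step X
    rw [show X * (X + 1) = (X + 1) * X by ring]
    exact this
  rw [htri]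
  ring
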